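-- pv_equiv track=rewrite | github.com/shunsuke-toba/kaggle-google-code-golf-2025 | arc_gen_common.py | grid_enhance
-- ===== SOURCE A (Python) =====
-- def grid(width, height, color=0):
--   return [[color for _ in range(width)] for _ in range(height)]
--
-- def grid_enhance(size, enhance, rows, cols, idxs, colors, b):
--   ingrid, output = grid(size, size, b), grid(size * enhance, size * enhance, b)
--   for r, c, idx in zip(rows, cols, idxs):
--     ingrid[r][c] = colors[idx]
--     for dr in range(enhance):
--       for dc in range(enhance):
--         output[r * enhance + dr][c * enhance + dc] = colors[idx]
--   return ingrid, output
-- ===== SOURCE B (Python) =====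
-- def grid_enhance(size, enhance, rows, cols, idxs, colors, b):
--   ingrid = [[b for _ in range(size)] for _ in range(size)]
--   for r, c, idx in zip(rows, cols, idxs):
--     ingrid[r][c] = colors[idx]
--   output = [[ingrid[i // enhance][j // enhance] for j in range(size * enhance)]
--             for i in range(size * enhance)]
--   return ingrid, output
-- ===== Notes on version B (the rewrite author's own statement) =====
-- stated objective: simpler
-- what changed: B drops the in-loop block painting and the b-prefill of the output grid: one loop places cells into ingrid, then a separate pass derives the whole output from the finished ingrid by integer-division indexing output[i][j] = ingrid[i//enhance][j//enhance].
-- outside the precondition, e.g. on grid_enhance(-1, -1, [], [], [], [], 0): A returns ([], [[0]]), B raises IndexError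
import Mathlib
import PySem

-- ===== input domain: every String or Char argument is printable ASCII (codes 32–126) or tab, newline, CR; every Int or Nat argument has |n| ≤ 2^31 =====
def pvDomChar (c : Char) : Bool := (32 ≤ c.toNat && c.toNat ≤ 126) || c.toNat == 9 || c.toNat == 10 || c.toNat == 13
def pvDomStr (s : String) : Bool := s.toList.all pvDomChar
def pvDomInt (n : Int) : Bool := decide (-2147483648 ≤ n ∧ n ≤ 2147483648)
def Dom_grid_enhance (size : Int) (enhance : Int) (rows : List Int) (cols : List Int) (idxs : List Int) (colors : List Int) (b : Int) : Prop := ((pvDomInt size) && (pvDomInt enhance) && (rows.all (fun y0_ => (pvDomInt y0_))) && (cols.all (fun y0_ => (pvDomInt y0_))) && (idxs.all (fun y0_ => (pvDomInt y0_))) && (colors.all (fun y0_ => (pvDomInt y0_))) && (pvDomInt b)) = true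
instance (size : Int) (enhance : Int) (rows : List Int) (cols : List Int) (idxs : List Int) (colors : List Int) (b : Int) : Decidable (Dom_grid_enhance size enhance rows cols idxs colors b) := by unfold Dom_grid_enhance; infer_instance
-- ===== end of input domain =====

-- B replaces A's in-loop block painting (and the b-prefill of the output grid) by a second,
-- separate pass that derives output[i][j] = ingrid[i//enhance][j//enhance] from the finished
-- ingrid (objective: simpler).  No argument is mutated by either version.

-- ===== PORT A =====
-- helper `grid(width, height, color)` of the module: a height x width grid of `color`
def pyGrid (width : Int) (height : Int) (color : Int) : List (List Int) :=
  (PySem.List.pyRange 0 height 1).map (fun _ => (PySem.List.pyRange 0 width 1).map (fun _ => color))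

-- `g[r][c] = v` (Python index semantics: a negative index wraps; where Python raises
-- IndexError this total form no-ops — exactly those inputs are excluded by Pre_grid_enhance)
def pySet2 (g : List (List Int)) (r : Int) (c : Int) (v : Int) : List (List Int) :=
  PySem.List.pySetD g r (PySem.List.pySetD (PySem.List.pyGetD g r []) c v)

def grid_enhance (size : Int) (enhance : Int) (rows : List Int) (cols : List Int) (idxs : List Int) (colors : List Int) (b : Int) : List (List Int) × List (List Int) :=
  (rows.zip (cols.zip idxs)).foldl
    (fun st t =>
      (pySet2 st.1 t.1 t.2.1 (PySem.List.pyGetD colors t.2.2 0),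
       (PySem.List.pyRange 0 enhance 1).foldl (fun o dr =>
         (PySem.List.pyRange 0 enhance 1).foldl (fun o dc =>
           pySet2 o (t.1 * enhance + dr) (t.2.1 * enhance + dc)
             (PySem.List.pyGetD colors t.2.2 0)) o) st.2))
    (pyGrid size size b, pyGrid (size * enhance) (size * enhance) b)

-- ===== PORT B =====
-- B's output derivation pass: output[i][j] = ingrid[i // enhance][j // enhance]
def expandB (n : Int) (e : Int) (g : List (List Int)) : List (List Int) :=
  (PySem.List.pyRange 0 n 1).map (fun i =>
    (PySem.List.pyRange 0 n 1).map (fun j =>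
      PySem.List.pyGetD (PySem.List.pyGetD g (PySem.Int.floordiv i e) []) (PySem.Int.floordiv j e) 0))

def grid_enhance_alt (size : Int) (enhance : Int) (rows : List Int) (cols : List Int) (idxs : List Int) (colors : List Int) (b : Int) : List (List Int) × List (List Int) :=
  let ingrid := (rows.zip (cols.zip idxs)).foldl
    (fun g t => pySet2 g t.1 t.2.1 (PySem.List.pyGetD colors t.2.2 0))
    (pyGrid size size b)
  (ingrid, expandB (size * enhance) enhance ingrid)

-- ===== PRECONDITION & SPEC =====
-- Pre_ excludes (a) cells whose row/col/color index is out of Python range, where A raises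
-- IndexError, and (b) size < 0 together with enhance < 0 (then necessarily no cells), where A
-- returns a spurious non-empty output grid for an empty input grid and the natural B raises
-- IndexError while deriving output from the empty ingrid.
def Pre_grid_enhance (size : Int) (enhance : Int) (rows : List Int) (cols : List Int) (idxs : List Int) (colors : List Int) (b : Int) : Prop :=
  (0 ≤ size ∨ 0 ≤ enhance) ∧
  ∀ t ∈ rows.zip (cols.zip idxs),
    (-size ≤ t.1 ∧ t.1 < size) ∧ (-size ≤ t.2.1 ∧ t.2.1 < size) ∧
    (-(colors.length : Int) ≤ t.2.2 ∧ t.2.2 < (colors.length : Int))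
instance (size : Int) (enhance : Int) (rows : List Int) (cols : List Int) (idxs : List Int) (colors : List Int) (b : Int) : Decidable (Pre_grid_enhance size enhance rows cols idxs colors b) := by unfold Pre_grid_enhance; infer_instance

def pvWitness_grid_enhance : Int × Int × List Int × List Int × List Int × List Int × Int :=
  (2, 2, [0, 1], [1, -1], [0, -1], [3, 4], 7)

def Spec_grid_enhance (size : Int) (enhance : Int) (rows : List Int) (cols : List Int) (idxs : List Int) (colors : List Int) (b : Int) (out : List (List Int) × List (List Int)) : Prop := out = grid_enhance_alt size enhance rows cols idxs colors b
instance (size : Int) (enhance : Int) (rows : List Int) (cols : List Int) (idxs : List Int) (colors : List Int) (b : Int) (out : List (List Int) × List (List Int)) : Decidable (Spec_grid_enhance size enhance rows cols idxs colors b out) := by unfold Spec_grid_enhance; infer_instance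

-- ===== CLAIM (what is proved, stated in full; the proofs are below) =====
def Claim_equal_grid_enhance : Prop := ∀ (size : Int) (enhance : Int) (rows : List Int) (cols : List Int) (idxs : List Int) (colors : List Int) (b : Int), Dom_grid_enhance size enhance rows cols idxs colors b → Pre_grid_enhance size enhance rows cols idxs colors b → Spec_grid_enhance size enhance rows cols idxs colors b (grid_enhance size enhance rows cols idxs colors b)

-- ===== LEMMAS AND PROOFS =====

def normN (n : Nat) (x : Int) : Nat := (if x < 0 then x + (n : Int) else x).toNat

theorem normN_lt (n : Nat) (x : Int) (h1 : -(n:Int) ≤ x) (h2 : x < n) : normN n x < n := by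
  unfold normN; split <;> omega

theorem pyIdx_norm (n : Nat) (x : Int) (h1 : -(n:Int) ≤ x) (h2 : x < n) :
    PySem.List.pyIdx? n x = some (normN n x) := by
  unfold normN PySem.List.pyIdx?
  split_ifs <;> first
  | rfl
  | (exfalso; omega)
  | (congr 1; omega)

theorem pyGetD_norm {α : Type} (xs : List α) (x : Int) (d : α)
    (h1 : -(xs.length:Int) ≤ x) (h2 : x < xs.length) :
    PySem.List.pyGetD xs x d = xs.getD (normN xs.length x) d := by
  unfold PySem.List.pyGetD PySem.List.pyGet?
  rw [pyIdx_norm _ _ h1 h2]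
  have hlt := normN_lt xs.length x h1 h2
  rw [List.getD_eq_getElem _ _ hlt]
  simp [List.getElem?_eq_getElem hlt]

theorem pySetD_norm {α : Type} (xs : List α) (x : Int) (v : α)
    (h1 : -(xs.length:Int) ≤ x) (h2 : x < xs.length) :
    PySem.List.pySetD xs x v = xs.set (normN xs.length x) v := by
  unfold PySem.List.pySetD PySem.List.pySet?
  rw [pyIdx_norm _ _ h1 h2]
  rfl

def Sq (m k : Nat) (g : List (List Int)) : Prop := g.length = m ∧ ∀ row ∈ g, row.length = k

def getRC (g : List (List Int)) (i j : Nat) : Int := (g.getD i []).getD j 0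

theorem row_len {m k : Nat} {g : List (List Int)} (hg : Sq m k g) {i : Nat} (hi : i < m) :
    (g.getD i []).length = k := by
  obtain ⟨hL, hR⟩ := hg
  rw [List.getD_eq_getElem _ _ (by omega)]
  exact hR _ (List.getElem_mem _)

theorem pySet2_norm {m k : Nat} {g : List (List Int)} (hg : Sq m k g) (x y v : Int)
    (hx1 : -(m:Int) ≤ x) (hx2 : x < m) (hy1 : -(k:Int) ≤ y) (hy2 : y < k) :
    pySet2 g x y v = g.set (normN m x) ((g.getD (normN m x) []).set (normN k y) v) := by
  have hL : g.length = m := hg.1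
  have hrow : (g.getD (normN m x) []).length = k := row_len hg (normN_lt m x hx1 hx2)
  unfold pySet2
  rw [pyGetD_norm g x [] (by omega) (by omega), hL]
  rw [pySetD_norm _ y v (by rw [hrow]; omega) (by rw [hrow]; omega), hrow]
  rw [pySetD_norm g x _ (by omega) (by omega), hL]

theorem Sq_set {m k : Nat} {g : List (List Int)} (hg : Sq m k g) (nx ny : Nat) (v : Int)
    (hnx : nx < m) : Sq m k (g.set nx ((g.getD nx []).set ny v)) := by
  obtain ⟨hL, hR⟩ := hg
  refine ⟨by simp [hL], fun row hrow => ?_⟩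
  rcases List.mem_or_eq_of_mem_set hrow with h | h
  · exact hR _ h
  · subst h
    rw [List.length_set]
    exact row_len ⟨hL, hR⟩ hnx

theorem getD_set' {α : Type} (l : List α) (n : Nat) (a : α) (i : Nat) (d : α) :
    (l.set n a).getD i d = if i = n ∧ n < l.length then a else l.getD i d := by
  rw [List.getD_eq_getElem?_getD, List.getElem?_set]
  by_cases h : n = i
  · subst h
    by_cases hl : n < l.length
    · simp [hl]
    · rw [if_pos rfl, if_neg hl, if_neg (fun hc => hl hc.2)]
      simp [List.getElem?_eq_none (by omega : l.length ≤ n)]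
  · rw [if_neg h, ← List.getD_eq_getElem?_getD, if_neg (fun hc => h hc.1.symm)]

theorem getRC_set (g : List (List Int)) (nx ny : Nat) (v : Int)
    (hnx : nx < g.length) (hny : ny < (g.getD nx []).length) (i j : Nat) :
    getRC (g.set nx ((g.getD nx []).set ny v)) i j
      = if i = nx ∧ j = ny then v else getRC g i j := by
  unfold getRC
  rw [getD_set']
  by_cases hi : i = nx
  · subst hi
    rw [if_pos ⟨rfl, hnx⟩, getD_set']
    by_cases hj : j = ny
    · rw [if_pos ⟨hj, hny⟩, if_pos ⟨rfl, hj⟩]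
    · rw [if_neg (fun hc => hj hc.1), if_neg (fun hc => hj hc.2)]
  · rw [if_neg (fun hc => hi hc.1), if_neg (fun hc => hi hc.1)]

theorem foldl_foldl_flatMap {α β γ : Type} (L1 : List α) (L2 : List β) (F : γ → α → β → γ) (o : γ) :
    L1.foldl (fun o a => L2.foldl (fun o b => F o a b) o) o
      = (L1.flatMap (fun a => L2.map (fun b => (a, b)))).foldl (fun o p => F o p.1 p.2) o := by
  induction L1 generalizing o with
  | nil => rfl
  | cons a L1 ih =>
    simp only [List.flatMap_cons, List.foldl_append, List.foldl_cons, List.foldl_map]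
    rw [ih]

-- norm_shift
theorem norm_shift {size e : Int} (hsz : 1 ≤ size) (he : 1 ≤ e) (x dr : Int)
    (hx1 : -size ≤ x) (hx2 : x < size) (hdr1 : 0 ≤ dr) (hdr2 : dr < e) :
    normN (size * e).toNat (x * e + dr) = normN size.toNat x * e.toNat + dr.toNat := by
  have hN : ((size * e).toNat : Int) = size * e := Int.toNat_of_nonneg (by positivity)
  have hS : ((size.toNat : Nat) : Int) = size := Int.toNat_of_nonneg (by omega)
  have hE : ((e.toNat : Nat) : Int) = e := Int.toNat_of_nonneg (by omega)
  by_cases hx : 0 ≤ x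
  · have h0 : 0 ≤ x * e + dr := by positivity
    have hc : ((x.toNat * e.toNat + dr.toNat : Nat) : Int) = x * e + dr := by
      push_cast [Int.toNat_of_nonneg hx, hE, Int.toNat_of_nonneg hdr1]
      ring
    unfold normN
    rw [if_neg (by omega), if_neg (by omega)]
    omega
  · have hxe : x * e ≤ -e := by
      have := mul_le_mul_of_nonneg_right (show x ≤ -1 by omega) (show (0:Int) ≤ e by omega)
      linarith
    have ht : x * e + dr < 0 := by omega
    have hc : (((x + size).toNat * e.toNat + dr.toNat : Nat) : Int) = (x * e + dr) + size * e := by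
      push_cast [Int.toNat_of_nonneg (show (0:Int) ≤ x + size by omega), hE, Int.toNat_of_nonneg hdr1]
      ring
    unfold normN
    rw [if_pos (by omega), if_pos (by omega), hS, hN]
    omega

theorem axis_iff {size e : Int} (hsz : 1 ≤ size) (he : 1 ≤ e) (x : Int)
    (hx1 : -size ≤ x) (hx2 : x < size) (i : Nat) :
    (∃ dr : Int, 0 ≤ dr ∧ dr < e ∧ normN (size * e).toNat (x * e + dr) = i)
      ↔ i / e.toNat = normN size.toNat x := by
  have heN : 0 < e.toNat := by omega
  constructor
  · rintro ⟨dr, h1, h2, h3⟩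
    rw [norm_shift hsz he x dr hx1 hx2 h1 h2] at h3
    subst h3
    rw [Nat.mul_comm, Nat.mul_add_div heN, Nat.div_eq_of_lt (by omega)]
    omega
  · intro hq
    have hm : i % e.toNat < e.toNat := Nat.mod_lt _ heN
    refine ⟨(i % e.toNat : Nat), by positivity, by omega, ?_⟩
    rw [norm_shift hsz he x _ hx1 hx2 (by positivity) (by omega)]
    have hdm := Nat.div_add_mod i e.toNat
    rw [hq, Nat.mul_comm] at hdm
    simp only [Int.toNat_natCast]
    omega

theorem Sq_expandB (n e : Int) (g : List (List Int)) : Sq n.toNat n.toNat (expandB n e g) := by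
  constructor
  · simp [expandB, PySem.List.length_pyRange_one]
  · intro row hrow
    simp only [expandB, List.mem_map] at hrow
    obtain ⟨i, _, hrow⟩ := hrow
    simp [← hrow, PySem.List.length_pyRange_one]

theorem Sq_pyGrid (w h c : Int) : Sq h.toNat w.toNat (pyGrid w h c) := by
  constructor
  · simp [pyGrid, PySem.List.length_pyRange_one]
  · intro row hrow
    simp only [pyGrid, List.mem_map] at hrow
    obtain ⟨i, _, hrow⟩ := hrow
    simp [← hrow, PySem.List.length_pyRange_one]

theorem eq_of_getRC {N : Nat} {A B : List (List Int)} (hA : Sq N N A) (hB : Sq N N B)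
    (h : ∀ i j, i < N → j < N → getRC A i j = getRC B i j) : A = B := by
  have hAL := hA.1
  have hBL := hB.1
  apply List.ext_getElem (by omega)
  intro i h1 h2
  have hi : i < N := by omega
  have hrA : A[i].length = N := hA.2 _ (List.getElem_mem _)
  have hrB : B[i].length = N := hB.2 _ (List.getElem_mem _)
  apply List.ext_getElem (by omega)
  intro j h3 h4
  have hj : j < N := by omega
  have hgot := h i j hi hj
  unfold getRC at hgot
  have e1 : A.getD i [] = A[i] := List.getD_eq_getElem _ _ (by omega)
  have e2 : B.getD i [] = B[i] := List.getD_eq_getElem _ _ (by omega)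
  rw [e1, e2] at hgot
  rwa [List.getD_eq_getElem _ _ (by omega), List.getD_eq_getElem _ _ (by omega)] at hgot

theorem fold_set_char {N : Nat} (v : Int) {α : Type} [DecidableEq α] (f h : α → Int) (P : List α) :
    ∀ (o : List (List Int)), Sq N N o →
    (∀ p ∈ P, -(N:Int) ≤ f p ∧ f p < N ∧ -(N:Int) ≤ h p ∧ h p < N) →
    Sq N N (P.foldl (fun o p => pySet2 o (f p) (h p) v) o) ∧
    ∀ i j : Nat, getRC (P.foldl (fun o p => pySet2 o (f p) (h p) v) o) i j
      = if ∃ p ∈ P, normN N (f p) = i ∧ normN N (h p) = j then v else getRC o i j := by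
  induction P with
  | nil =>
    intro o hSq _
    exact ⟨hSq, by simp⟩
  | cons p P ih =>
    intro o hSq hb
    have hoL := hSq.1
    have hbp := hb p List.mem_cons_self
    have hset : pySet2 o (f p) (h p) v
        = o.set (normN N (f p)) ((o.getD (normN N (f p)) []).set (normN N (h p)) v) :=
      pySet2_norm hSq (f p) (h p) v (by omega) (by omega) (by omega) (by omega)
    have hSq' : Sq N N (pySet2 o (f p) (h p) v) := by
      rw [hset]
      exact Sq_set hSq _ _ v (normN_lt N (f p) (by omega) (by omega))
    obtain ⟨ihSq, ihget⟩ := ih (pySet2 o (f p) (h p) v) hSq'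
      (fun q hq => hb q (List.mem_cons_of_mem _ hq))
    refine ⟨by simpa using ihSq, ?_⟩
    intro i j
    rw [List.foldl_cons, ihget i j]
    rw [hset, getRC_set o _ _ v
      (by rw [hoL]; exact normN_lt N (f p) (by omega) (by omega))
      (by rw [row_len hSq (normN_lt N (f p) (by omega) (by omega))]
          exact normN_lt N (h p) (by omega) (by omega))]
    have hiff : (i = normN N (f p) ∧ j = normN N (h p))
        ↔ (normN N (f p) = i ∧ normN N (h p) = j) := by
      constructor <;> (rintro ⟨a, b⟩; exact ⟨a.symm, b.symm⟩)
    simp only [List.exists_mem_cons_iff, hiff]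
    by_cases hP : ∃ q ∈ P, normN N (f q) = i ∧ normN N (h q) = j
    · rw [if_pos hP, if_pos (Or.inr hP)]
    · rw [if_neg hP]
      by_cases hp : normN N (f p) = i ∧ normN N (h p) = j
      · rw [if_pos hp, if_pos (Or.inl hp)]
      · rw [if_neg hp, if_neg (fun hc => Or.elim hc hp hP)]

theorem expand_row {size e : Int} (hsz : 1 ≤ size) (he : 1 ≤ e) (g : List (List Int))
    (i : Nat) (hi : i < (size * e).toNat) :
    (expandB (size * e) e g).getD i []
      = (PySem.List.pyRange 0 (size * e) 1).map (fun j =>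
          PySem.List.pyGetD (PySem.List.pyGetD g (PySem.Int.floordiv (i : Int) e) [])
            (PySem.Int.floordiv j e) 0) := by
  have hN : ((size * e).toNat : Int) = size * e := Int.toNat_of_nonneg (by positivity)
  unfold expandB
  rw [← PySem.List.pyGetD_natCast]
  exact PySem.List.pyGetD_map_pyRange_of_nonneg _ _ _ _ (by positivity) (by omega)

theorem expand_entry {size e : Int} (hsz : 1 ≤ size) (he : 1 ≤ e) (g : List (List Int))
    (i j : Nat) (hi : i < (size * e).toNat) (hj : j < (size * e).toNat) :
    getRC (expandB (size * e) e g) i j = getRC g (i / e.toNat) (j / e.toNat) := by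
  have hN : ((size * e).toNat : Int) = size * e := Int.toNat_of_nonneg (by positivity)
  have hE : ((e.toNat : Nat) : Int) = e := Int.toNat_of_nonneg (by omega)
  unfold getRC
  rw [expand_row hsz he g i hi]
  conv_lhs => rw [← PySem.List.pyGetD_natCast]
  rw [PySem.List.pyGetD_map_pyRange_of_nonneg _ _ _ _ (by positivity) (by omega)]
  rw [show (e:Int) = ((e.toNat : Nat) : Int) from hE.symm]
  simp only [PySem.Int.floordiv_natCast, PySem.List.pyGetD_natCast, Int.toNat_natCast]

theorem pos_bound {size e : Int} (hsz : 1 ≤ size) (he : 1 ≤ e) (x dr : Int)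
    (hx1 : -size ≤ x) (hx2 : x < size) (hdr1 : 0 ≤ dr) (hdr2 : dr < e) :
    -((size * e).toNat : Int) ≤ x * e + dr ∧ x * e + dr < ((size * e).toNat : Int) := by
  have hN : ((size * e).toNat : Int) = size * e := Int.toNat_of_nonneg (by positivity)
  have h1 : x * e ≤ (size - 1) * e :=
    mul_le_mul_of_nonneg_right (by omega) (by omega)
  have h2 : -size * e ≤ x * e :=
    mul_le_mul_of_nonneg_right (by omega) (by omega)
  have hr1 : (size - 1) * e + e = size * e := by ring
  have hr2 : -size * e = -(size * e) := by ring
  omega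

theorem paint_eq {size e : Int} (hsz : 1 ≤ size) {g : List (List Int)}
    (hg : Sq size.toNat size.toNat g) (x y v : Int)
    (hx1 : -size ≤ x) (hx2 : x < size) (hy1 : -size ≤ y) (hy2 : y < size) :
    (PySem.List.pyRange 0 e 1).foldl (fun o dr =>
      (PySem.List.pyRange 0 e 1).foldl (fun o dc =>
        pySet2 o (x * e + dr) (y * e + dc) v) o) (expandB (size * e) e g)
      = expandB (size * e) e (pySet2 g x y v) := by
  have hS : ((size.toNat : Nat) : Int) = size := Int.toNat_of_nonneg (by omega)
  by_cases he : 1 ≤ e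
  · have hN : ((size * e).toNat : Int) = size * e := Int.toNat_of_nonneg (by positivity)
    have hE : ((e.toNat : Nat) : Int) = e := Int.toNat_of_nonneg (by omega)
    rw [foldl_foldl_flatMap]
    obtain ⟨hSqF, hgetF⟩ := fold_set_char (N := (size * e).toNat) v
      (fun p => x * e + p.1) (fun p => y * e + p.2)
      ((PySem.List.pyRange 0 e 1).flatMap fun a => (PySem.List.pyRange 0 e 1).map fun b => (a, b))
      (expandB (size * e) e g) (Sq_expandB (size * e) e g)
      (by
        intro p hp
        simp only [List.mem_flatMap, List.mem_map] at hp
        obtain ⟨dr, hdr, dc, hdc, rfl⟩ := hp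
        rw [PySem.List.mem_pyRange_one] at hdr hdc
        obtain ⟨b1, b2⟩ := pos_bound hsz he x dr hx1 hx2 hdr.1 hdr.2
        obtain ⟨b3, b4⟩ := pos_bound hsz he y dc hy1 hy2 hdc.1 hdc.2
        exact ⟨b1, b2, b3, b4⟩)
    apply eq_of_getRC hSqF (Sq_expandB (size * e) e (pySet2 g x y v))
    intro i j hi hj
    have hsetg : pySet2 g x y v
        = g.set (normN size.toNat x) ((g.getD (normN size.toNat x) []).set (normN size.toNat y) v) :=
      pySet2_norm hg x y v (by omega) (by omega) (by omega) (by omega)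
    rw [hgetF i j, expand_entry hsz he g i j hi hj,
        expand_entry hsz he (pySet2 g x y v) i j hi hj, hsetg,
        getRC_set g _ _ v
          (by rw [hg.1]; exact normN_lt _ x (by omega) (by omega))
          (by rw [row_len hg (normN_lt _ x (by omega) (by omega))]
              exact normN_lt _ y (by omega) (by omega))]
    have hcond : (∃ p ∈ (PySem.List.pyRange 0 e 1).flatMap
          (fun a => (PySem.List.pyRange 0 e 1).map fun b => (a, b)),
          normN (size * e).toNat (x * e + p.1) = i ∧ normN (size * e).toNat (y * e + p.2) = j)
        ↔ (i / e.toNat = normN size.toNat x ∧ j / e.toNat = normN size.toNat y) := by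
      rw [← axis_iff hsz he x hx1 hx2 i, ← axis_iff hsz he y hy1 hy2 j]
      constructor
      · rintro ⟨p, hp, h1, h2⟩
        simp only [List.mem_flatMap, List.mem_map] at hp
        obtain ⟨dr, hdr, dc, hdc, rfl⟩ := hp
        rw [PySem.List.mem_pyRange_one] at hdr hdc
        exact ⟨⟨dr, hdr.1, hdr.2, h1⟩, ⟨dc, hdc.1, hdc.2, h2⟩⟩
      · rintro ⟨⟨dr, hdr1, hdr2, h1⟩, ⟨dc, hdc1, hdc2, h2⟩⟩
        refine ⟨(dr, dc), ?_, h1, h2⟩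
        simp only [List.mem_flatMap, List.mem_map]
        exact ⟨dr, PySem.List.mem_pyRange_one.2 ⟨hdr1, hdr2⟩,
               dc, PySem.List.mem_pyRange_one.2 ⟨hdc1, hdc2⟩, rfl⟩
    rw [if_congr hcond rfl rfl]
  · have hrange : PySem.List.pyRange 0 e 1 = [] := PySem.List.pyRange_one_eq_nil (by omega)
    have hN0 : (size * e).toNat = 0 := by
      have : size * e ≤ 0 := mul_nonpos_of_nonneg_of_nonpos (by omega) (by omega)
      omega
    have hrange2 : PySem.List.pyRange 0 (size * e) 1 = [] :=
      PySem.List.pyRange_one_eq_nil (by omega)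
    rw [hrange]
    simp only [List.foldl_nil]
    simp [expandB, hrange2]

theorem init_eq (size e b : Int) (h : 0 ≤ size ∨ 0 ≤ e) :
    pyGrid (size * e) (size * e) b = expandB (size * e) e (pyGrid size size b) := by
  by_cases hse : 0 < size * e
  · obtain ⟨hs, he⟩ : 0 < size ∧ 0 < e := by
      rcases Int.mul_pos_iff.1 hse with ⟨h1, h2⟩ | ⟨h1, h2⟩
      · exact ⟨h1, h2⟩
      · omega
    unfold pyGrid expandB
    apply List.map_congr_left
    intro i hi
    rw [PySem.List.mem_pyRange_one] at hi
    apply List.map_congr_left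
    intro j hj
    rw [PySem.List.mem_pyRange_one] at hj
    have hdi1 : 0 ≤ PySem.Int.floordiv i e := (PySem.Int.le_floordiv_iff_mul_le he).2 (by linarith)
    have hdi2 : PySem.Int.floordiv i e < size := (PySem.Int.floordiv_lt_iff_lt_mul he).2 (by linarith)
    have hdj1 : 0 ≤ PySem.Int.floordiv j e := (PySem.Int.le_floordiv_iff_mul_le he).2 (by linarith)
    have hdj2 : PySem.Int.floordiv j e < size := (PySem.Int.floordiv_lt_iff_lt_mul he).2 (by linarith)
    rw [PySem.List.pyGetD_map_pyRange_of_nonneg _ _ _ _ hdi1 hdi2,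
        PySem.List.pyGetD_map_pyRange_of_nonneg _ _ _ _ hdj1 hdj2]
  · have hr : PySem.List.pyRange 0 (size * e) 1 = [] :=
      PySem.List.pyRange_one_eq_nil (by omega)
    simp [pyGrid, expandB, hr]

theorem snd_inv {size e : Int} (colors : List Int) (hsz : 1 ≤ size)
    (L : List (Int × Int × Int)) :
    ∀ g : List (List Int), Sq size.toNat size.toNat g →
    (∀ t ∈ L, -size ≤ t.1 ∧ t.1 < size ∧ -size ≤ t.2.1 ∧ t.2.1 < size) →
    L.foldl (fun o t =>
        (PySem.List.pyRange 0 e 1).foldl (fun o dr =>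
          (PySem.List.pyRange 0 e 1).foldl (fun o dc =>
            pySet2 o (t.1 * e + dr) (t.2.1 * e + dc) (PySem.List.pyGetD colors t.2.2 0)) o) o)
      (expandB (size * e) e g)
      = expandB (size * e) e
          (L.foldl (fun g t => pySet2 g t.1 t.2.1 (PySem.List.pyGetD colors t.2.2 0)) g) := by
  induction L with
  | nil => intro g _ _; rfl
  | cons t L ih =>
    intro g hg hb
    have hbt := hb t List.mem_cons_self
    simp only [List.foldl_cons]
    rw [paint_eq hsz hg t.1 t.2.1 (PySem.List.pyGetD colors t.2.2 0)
        (by omega) (by omega) (by omega) (by omega)]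
    apply ih
    · have hS : ((size.toNat : Nat) : Int) = size := Int.toNat_of_nonneg (by omega)
      rw [pySet2_norm hg t.1 t.2.1 _ (by omega) (by omega) (by omega) (by omega)]
      exact Sq_set hg _ _ _ (normN_lt _ t.1 (by omega) (by omega))
    · exact fun q hq => hb q (List.mem_cons_of_mem _ hq)

theorem grid_enhance_eq_alt (size enhance : Int) (rows cols idxs colors : List Int) (b : Int)
    (hpre : Pre_grid_enhance size enhance rows cols idxs colors b) :
    grid_enhance size enhance rows cols idxs colors b
      = grid_enhance_alt size enhance rows cols idxs colors b := by
  obtain ⟨hdisj, hbnd⟩ := hpre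
  unfold grid_enhance grid_enhance_alt
  rw [PySem.List.foldl_prod_mk
    (fun g t => pySet2 g t.1 t.2.1 (PySem.List.pyGetD colors t.2.2 0))
    (fun o (t : Int × Int × Int) =>
      (PySem.List.pyRange 0 enhance 1).foldl (fun o dr =>
        (PySem.List.pyRange 0 enhance 1).foldl (fun o dc =>
          pySet2 o (t.1 * enhance + dr) (t.2.1 * enhance + dc)
            (PySem.List.pyGetD colors t.2.2 0)) o) o)]
  have hsnd : (rows.zip (cols.zip idxs)).foldl
      (fun o (t : Int × Int × Int) =>
        (PySem.List.pyRange 0 enhance 1).foldl (fun o dr =>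
          (PySem.List.pyRange 0 enhance 1).foldl (fun o dc =>
            pySet2 o (t.1 * enhance + dr) (t.2.1 * enhance + dc)
              (PySem.List.pyGetD colors t.2.2 0)) o) o)
      (pyGrid (size * enhance) (size * enhance) b)
      = expandB (size * enhance) enhance
          ((rows.zip (cols.zip idxs)).foldl
            (fun g t => pySet2 g t.1 t.2.1 (PySem.List.pyGetD colors t.2.2 0))
            (pyGrid size size b)) := by
    rw [init_eq size enhance b hdisj]
    by_cases hsz : 1 ≤ size
    · exact snd_inv colors hsz _ _ (Sq_pyGrid size size b)
        (fun t ht => by obtain ⟨⟨a1, a2⟩, ⟨b1, b2⟩, _⟩ := hbnd t ht; exact ⟨a1, a2, b1, b2⟩)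
    · cases hz : rows.zip (cols.zip idxs) with
      | nil => rfl
      | cons t L' =>
        obtain ⟨⟨a1, a2⟩, _⟩ := hbnd t (hz ▸ List.mem_cons_self)
        omega
  exact Prod.ext rfl hsnd

-- ===== VERDICT (by name: the statement is the Claim_ definition above) =====
theorem grid_enhance_spec : Claim_equal_grid_enhance := by
  intro size enhance rows cols idxs colors b _ hpre
  exact grid_enhance_eq_alt size enhance rows cols idxs colors b hpre
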